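-- pv_equiv track=rewrite | github.com/sergiomb2/VirtualBox | src/VBox/VMM/VMMAll/target-armv8/bsd-spec-analyze.py | compileAlgo
-- ===== SOURCE A (Python) =====
-- def compileAlgo(fMask):
--     """
--     Returns an with instructions for extracting the bits from the mask into
--     a compacted form. Each array entry is an array/tuple of source bit [0],
--     destination bit [1], and bit counts [2].
--     """
--     aaiAlgo   = [];
--     iSrcBit   = 0;
--     iDstBit   = 0;
--     while fMask > 0:
--         # Skip leading zeros.
--         cSkip    = (fMask & -fMask).bit_length() - 1;
--         #assert (fMask & ((1 << cSkip) - 1)) == 0 and ((fMask >> cSkip) & 1), 'fMask=%#x cSkip=%d' % (fMask, cSkip)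
--         iSrcBit += cSkip;
--         fMask  >>= cSkip;
--
--         # Calculate leading ones the same way.
--         cCount = (~fMask & -~fMask).bit_length() - 1;
--         #assert (fMask & ((1 << cCount) - 1)) == ((1 << cCount) - 1) and (fMask & (1 << cCount)) == 0
--
--         # Append to algo list.
--         aaiAlgo.append((iSrcBit, iDstBit, (1 << cCount) - 1));
--
--         # Advance.
--         iDstBit += cCount;
--         iSrcBit += cCount;
--         fMask  >>= cCount;
--     return aaiAlgo;
-- ===== SOURCE B (Python) =====
-- def compileAlgo(fMask):
--     """
--     Returns instructions for extracting the bits from the mask into a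
--     compacted form: list of (source bit, destination bit, bit count mask).
--     Linear one-bit-at-a-time scan instead of bit-trick run hopping.
--     """
--     aaiAlgo = []
--     iSrcBit = 0
--     iDstBit = 0
--     cRun = 0
--     while fMask > 0:
--         if fMask & 1:
--             cRun += 1
--         elif cRun:
--             aaiAlgo.append((iSrcBit - cRun, iDstBit, (1 << cRun) - 1))
--             iDstBit += cRun
--             cRun = 0
--         fMask >>= 1
--         iSrcBit += 1
--     if cRun:
--         aaiAlgo.append((iSrcBit - cRun, iDstBit, (1 << cRun) - 1))
--     return aaiAlgo
-- ===== Notes on version B (the rewrite author's own statement) =====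
-- stated objective: simpler
-- what changed: Replaces A's bit-trick run hopping (isolating the lowest set bit and lowest clear bit via bit_length to jump over whole zero/one runs) by a plain linear one-bit-at-a-time scan with a run-length counter that flushes an instruction at each transition from a set bit to a clear bit, and once at the end.
import Mathlib
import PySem

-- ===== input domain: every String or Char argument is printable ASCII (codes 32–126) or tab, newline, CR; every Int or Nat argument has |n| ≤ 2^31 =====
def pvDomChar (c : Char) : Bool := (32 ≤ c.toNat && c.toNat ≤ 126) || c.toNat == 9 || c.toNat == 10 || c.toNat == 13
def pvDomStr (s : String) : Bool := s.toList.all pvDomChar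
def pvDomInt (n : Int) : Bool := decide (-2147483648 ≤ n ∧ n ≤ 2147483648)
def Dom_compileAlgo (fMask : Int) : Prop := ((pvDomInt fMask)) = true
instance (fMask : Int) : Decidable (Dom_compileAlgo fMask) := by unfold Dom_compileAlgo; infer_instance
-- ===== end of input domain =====

-- B replaces A's bit-trick run hopping by a plain one-bit-at-a-time transition scan (objective: simpler).

-- ===== PORT A =====
-- Python's x.bit_length() (exact: Python uses the absolute value)
def pvBitLength (n : Int) : Nat := Nat.size n.natAbs

-- loop of A: skip a zero-run, consume a one-run, emit one instruction.
-- Loop state is nonnegative throughout in Python (guard fMask > 0), represented as Nat (exact).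
-- fuel only makes the recursion structural; the mask shrinks every iteration, so fuel = mask + 1
-- is never exhausted (proved in the lemmas below).
def compileAlgoGoA : Nat → Nat → Int → Int → List (Int × Int × Int) → List (Int × Int × Int)
  | 0, _, _, _, aaiAlgo => aaiAlgo
  | fuel + 1, m, iSrcBit, iDstBit, aaiAlgo =>
    if 0 < m then
      -- cSkip = (fMask & -fMask).bit_length() - 1
      let cSkip : Nat := pvBitLength (Int.land (Int.ofNat m) (-(Int.ofNat m))) - 1
      let iSrcBit' := iSrcBit + (cSkip : Int)
      let m1 := m >>> cSkip
      -- cCount = (~fMask & -~fMask).bit_length() - 1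
      let cCount : Nat := pvBitLength (Int.land (~~~(Int.ofNat m1)) (-(~~~(Int.ofNat m1)))) - 1
      let aaiAlgo' := aaiAlgo ++ [(iSrcBit', iDstBit, ((1 : Int) <<< cCount) - 1)]
      compileAlgoGoA fuel (m1 >>> cCount) (iSrcBit' + (cCount : Int)) (iDstBit + (cCount : Int)) aaiAlgo'
    else aaiAlgo

def compileAlgo (fMask : Int) : List (Int × Int × Int) :=
  compileAlgoGoA (fMask.toNat + 1) fMask.toNat 0 0 []

-- ===== PORT B =====
-- loop of B: one bit per iteration, run-length state cRun, flush on a 0 bit or at the end.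
-- fuel = mask + 1 as above (B consumes at least one mask bit per step).
def compileAlgoGoB : Nat → Nat → Int → Int → Nat → List (Int × Int × Int) → List (Int × Int × Int)
  | 0, _, _, _, _, aaiAlgo => aaiAlgo
  | fuel + 1, m, iSrcBit, iDstBit, cRun, aaiAlgo =>
    if 0 < m then
      if m &&& 1 ≠ 0 then
        compileAlgoGoB fuel (m >>> 1) (iSrcBit + 1) iDstBit (cRun + 1) aaiAlgo
      else if cRun ≠ 0 then
        compileAlgoGoB fuel (m >>> 1) (iSrcBit + 1) (iDstBit + (cRun : Int)) 0
          (aaiAlgo ++ [(iSrcBit - (cRun : Int), iDstBit, ((1 : Int) <<< cRun) - 1)])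
      else
        compileAlgoGoB fuel (m >>> 1) (iSrcBit + 1) iDstBit 0 aaiAlgo
    else if cRun ≠ 0 then
      aaiAlgo ++ [(iSrcBit - (cRun : Int), iDstBit, ((1 : Int) <<< cRun) - 1)]
    else aaiAlgo

def compileAlgo_alt (fMask : Int) : List (Int × Int × Int) :=
  compileAlgoGoB (fMask.toNat + 1) fMask.toNat 0 0 0 []

-- ===== PRECONDITION & SPEC =====
def Spec_compileAlgo (fMask : Int) (out : List (Int × Int × Int)) : Prop := out = compileAlgo_alt fMask
instance (fMask : Int) (out : List (Int × Int × Int)) : Decidable (Spec_compileAlgo fMask out) := by unfold Spec_compileAlgo; infer_instance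

-- ===== CLAIM (what is proved, stated in full; the proofs are below) =====
def Claim_equal_compileAlgo : Prop := ∀ (fMask : Int), Dom_compileAlgo fMask → Spec_compileAlgo fMask (compileAlgo fMask)

-- ===== LEMMAS AND PROOFS =====
-- number of trailing zero bits
def pvTz (m : Nat) : Nat :=
  if m = 0 then 0 else if m % 2 = 1 then 0 else pvTz (m / 2) + 1
decreasing_by exact Nat.div_lt_self (by omega) (by omega)

-- number of trailing one bits
def pvOnes (q : Nat) : Nat := pvTz (q + 1)

theorem pv_ldiff_self (a : Nat) : Nat.ldiff a a = 0 := by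
  apply Nat.eq_of_testBit_eq
  intro i
  simp [Nat.testBit_ldiff]

theorem pvTz_odd_eq (m : Nat) (h : m % 2 = 1) : pvTz m = 0 := by
  conv_lhs => unfold pvTz
  simp [h]

theorem pvTz_even_eq (m : Nat) (h0 : m ≠ 0) (h : m % 2 = 0) : pvTz m = pvTz (m / 2) + 1 := by
  conv_lhs => unfold pvTz
  simp [h0, h]

-- the low-bit trick: ldiff (k+1) k isolates the lowest bit of k+1
theorem pv_ldiff_succ : ∀ k : Nat, Nat.ldiff (k + 1) k = 2 ^ pvTz (k + 1) := by
  intro k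
  induction k using Nat.strong_induction_on with
  | _ k ih =>
    rcases Nat.even_or_odd k with he | ho
    · -- k even, k+1 odd: lowest bit is bit 0
      have hk2 : k % 2 = 0 := Nat.even_iff.mp he
      have h1 : k + 1 = Nat.bit true (k / 2) := by simp [Nat.bit]; omega
      have h2 : k = Nat.bit false (k / 2) := by simp [Nat.bit]; omega
      rw [pvTz_odd_eq (k + 1) (by omega)]
      calc Nat.ldiff (k + 1) k
          = Nat.bitwise (fun x y => x && !y) (Nat.bit true (k / 2)) (Nat.bit false (k / 2)) := by
            rw [← h1, ← h2]; rfl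
        _ = Nat.bit true (Nat.ldiff (k / 2) (k / 2)) := by
            rw [Nat.bitwise_bit]; rfl
        _ = 2 ^ 0 := by rw [pv_ldiff_self]; simp [Nat.bit]
    · -- k odd, k+1 even: recurse on k/2
      have hk2 : k % 2 = 1 := Nat.odd_iff.mp ho
      have h1 : k + 1 = Nat.bit false (k / 2 + 1) := by simp [Nat.bit]; omega
      have h2 : k = Nat.bit true (k / 2) := by simp [Nat.bit]; omega
      have htz : pvTz (k + 1) = pvTz (k / 2 + 1) + 1 := by
        rw [pvTz_even_eq (k + 1) (by omega) (by omega)]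
        have h3 : (k + 1) / 2 = k / 2 + 1 := by omega
        rw [h3]
      calc Nat.ldiff (k + 1) k
          = Nat.bitwise (fun x y => x && !y) (Nat.bit false (k / 2 + 1)) (Nat.bit true (k / 2)) := by
            rw [← h1, ← h2]; rfl
        _ = Nat.bit false (Nat.ldiff (k / 2 + 1) (k / 2)) := by rw [Nat.bitwise_bit]; rfl
        _ = 2 * (2 ^ pvTz (k / 2 + 1)) := by rw [ih (k / 2) (by omega)]; simp [Nat.bit]
        _ = 2 ^ pvTz (k + 1) := by rw [htz]; ring

-- fMask & -fMask for positive fMask, reduced to the trailing-zero count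
theorem pv_land_neg (m : Nat) (h : 0 < m) :
    Int.land (Int.ofNat m) (-(Int.ofNat m)) = Int.ofNat (2 ^ pvTz m) := by
  obtain ⟨k, rfl⟩ : ∃ k, m = k + 1 := ⟨m - 1, by omega⟩
  show Int.land (Int.ofNat (k + 1)) (Int.negSucc k) = _
  show Int.ofNat (Nat.ldiff (k + 1) k) = _
  rw [pv_ldiff_succ]

-- ~fMask & -~fMask for nonnegative fMask: lowest zero bit of fMask
theorem pv_land_not (m : Nat) :
    Int.land (~~~(Int.ofNat m)) (-(~~~(Int.ofNat m))) = Int.ofNat (2 ^ pvTz (m + 1)) := by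
  show Int.land (Int.negSucc m) (Int.ofNat (m + 1)) = _
  show Int.ofNat (Nat.ldiff (m + 1) m) = _
  rw [pv_ldiff_succ]

theorem pvBitLength_pow (t : Nat) : pvBitLength (Int.ofNat (2 ^ t)) = t + 1 := by
  simp [pvBitLength, Nat.size_pow]

theorem pv_shiftRight_succ_div (m a : Nat) : m >>> (a + 1) = (m / 2) >>> a := by
  simp [Nat.shiftRight_eq_div_pow, pow_succ, Nat.div_div_eq_div_mul]
  ring_nf

-- m >>> pvTz m is odd for positive m
theorem pv_shift_tz_odd : ∀ m : Nat, 0 < m → (m >>> pvTz m) % 2 = 1 := by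
  intro m
  induction m using Nat.strong_induction_on with
  | _ m ih =>
    intro hm
    rcases Nat.even_or_odd m with he | ho
    · have hm2 : m % 2 = 0 := Nat.even_iff.mp he
      rw [pvTz_even_eq m (by omega) hm2, pv_shiftRight_succ_div]
      exact ih (m / 2) (by omega) (by omega)
    · have hm2 : m % 2 = 1 := Nat.odd_iff.mp ho
      rw [pvTz_odd_eq m hm2]
      simpa using hm2

theorem pv_shift_lt (q c : Nat) (hq : 0 < q) (hc : 1 ≤ c) : q >>> c < q := by
  rw [Nat.shiftRight_eq_div_pow]
  have h2 : 2 ≤ 2 ^ c := by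
    calc 2 = 2 ^ 1 := rfl
      _ ≤ 2 ^ c := Nat.pow_le_pow_right (by omega) hc
  calc q / 2 ^ c ≤ q / 2 := Nat.div_le_div_left h2 (by omega)
    _ < q := by omega

theorem pvOnes_even (q : Nat) (h : q % 2 = 0) : pvOnes q = 0 :=
  pvTz_odd_eq (q + 1) (by omega)

theorem pvOnes_odd (q : Nat) (h : q % 2 = 1) : pvOnes q = pvOnes (q / 2) + 1 := by
  unfold pvOnes
  rw [pvTz_even_eq (q + 1) (by omega) (by omega)]
  have h3 : (q + 1) / 2 = q / 2 + 1 := by omega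
  rw [h3]

theorem pvOnes_pos (q : Nat) (h : q % 2 = 1) : 1 ≤ pvOnes q := by
  rw [pvOnes_odd q h]; omega

-- unfolding of A's loop body, with the bit tricks replaced by their characterizations
theorem goA_unfold (fuel m : Nat) (iSrc iDst : Int) (acc : List (Int × Int × Int)) (h : 0 < m) :
    compileAlgoGoA (fuel + 1) m iSrc iDst acc =
      compileAlgoGoA fuel ((m >>> pvTz m) >>> pvOnes (m >>> pvTz m))
        (iSrc + (pvTz m : Int) + (pvOnes (m >>> pvTz m) : Int))
        (iDst + (pvOnes (m >>> pvTz m) : Int))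
        (acc ++ [(iSrc + (pvTz m : Int), iDst, ((1 : Int) <<< pvOnes (m >>> pvTz m)) - 1)]) := by
  rw [compileAlgoGoA]
  simp only [pvOnes, if_pos h, pv_land_neg m h, pvBitLength_pow, Nat.add_sub_cancel,
    pv_land_not]

theorem goA_zero (fuel : Nat) (iSrc iDst : Int) (acc : List (Int × Int × Int)) :
    compileAlgoGoA fuel 0 iSrc iDst acc = acc := by
  cases fuel <;> simp [compileAlgoGoA]

-- B ignores the exact fuel amount as long as it exceeds the mask
theorem goB_fuel : ∀ m f f' : Nat, m < f → m < f' →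
    ∀ (iSrc iDst : Int) (k : Nat) (acc : List (Int × Int × Int)),
    compileAlgoGoB f m iSrc iDst k acc = compileAlgoGoB f' m iSrc iDst k acc := by
  intro m
  induction m using Nat.strong_induction_on with
  | _ m ih =>
    intro f f' hf hf' iSrc iDst k acc
    obtain ⟨g, rfl⟩ : ∃ g, f = g + 1 := ⟨f - 1, by omega⟩
    obtain ⟨g', rfl⟩ : ∃ g', f' = g' + 1 := ⟨f' - 1, by omega⟩
    rw [compileAlgoGoB, compileAlgoGoB]
    rcases Nat.eq_zero_or_pos m with rfl | hm
    · simp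
    have hlt : m >>> 1 < m := pv_shift_lt m 1 hm (by omega)
    simp only [if_pos hm]
    split_ifs <;> exact ih _ hlt g g' (by omega) (by omega) _ _ _ _

-- B with fuel exhaustion never reached, at mask 0
theorem goB_stop (fuel : Nat) (hf : 0 < fuel) (iSrc iDst : Int) (k : Nat)
    (acc : List (Int × Int × Int)) :
    compileAlgoGoB fuel 0 iSrc iDst k acc =
      if k ≠ 0 then acc ++ [(iSrc - (k : Int), iDst, ((1 : Int) <<< k) - 1)] else acc := by
  obtain ⟨g, rfl⟩ : ∃ g, fuel = g + 1 := ⟨fuel - 1, by omega⟩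
  rw [compileAlgoGoB]
  simp

-- B skips a zero-run with cRun = 0 (right side at canonical fuel)
theorem goB_skip : ∀ m fuel : Nat, m < fuel → ∀ (iSrc iDst : Int) (acc : List (Int × Int × Int)),
    compileAlgoGoB fuel m iSrc iDst 0 acc =
      compileAlgoGoB (m >>> pvTz m + 1) (m >>> pvTz m) (iSrc + (pvTz m : Int)) iDst 0 acc := by
  intro m
  induction m using Nat.strong_induction_on with
  | _ m ih =>
    intro fuel hf iSrc iDst acc
    rcases Nat.eq_zero_or_pos m with rfl | hm
    · simp only [Nat.zero_shiftRight]
      rw [goB_stop fuel (by omega), goB_stop 1 (by omega)]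
      simp
    rcases Nat.even_or_odd m with he | ho
    · have hm2 : m % 2 = 0 := Nat.even_iff.mp he
      obtain ⟨g, rfl⟩ : ∃ g, fuel = g + 1 := ⟨fuel - 1, by omega⟩
      have h1 : m >>> 1 = m / 2 := by rw [Nat.shiftRight_eq_div_pow]
      have hstep : compileAlgoGoB (g + 1) m iSrc iDst 0 acc =
          compileAlgoGoB g (m / 2) (iSrc + 1) iDst 0 acc := by
        rw [compileAlgoGoB]
        simp [hm, Nat.and_one_is_mod, hm2, h1]
      rw [hstep, ih (m / 2) (by omega) g (by omega), pvTz_even_eq m (by omega) hm2,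
        pv_shiftRight_succ_div]
      congr 1
      push_cast
      ring
    · have hm2 : m % 2 = 1 := Nat.odd_iff.mp ho
      rw [pvTz_odd_eq m hm2]
      simp only [Nat.shiftRight_zero, Nat.cast_zero, add_zero]
      exact goB_fuel m fuel (m + 1) hf (by omega) _ _ _ _

-- B consumes a one-run, adding its length to cRun (right side at canonical fuel)
theorem goB_ones : ∀ q fuel : Nat, q < fuel →
    ∀ (iSrc iDst : Int) (k : Nat) (acc : List (Int × Int × Int)),
    compileAlgoGoB fuel q iSrc iDst k acc =
      compileAlgoGoB (q >>> pvOnes q + 1) (q >>> pvOnes q) (iSrc + (pvOnes q : Int)) iDst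
        (k + pvOnes q) acc := by
  intro q
  induction q using Nat.strong_induction_on with
  | _ q ih =>
    intro fuel hf iSrc iDst k acc
    rcases Nat.even_or_odd q with he | ho
    · have hq2 : q % 2 = 0 := Nat.even_iff.mp he
      rw [pvOnes_even q hq2]
      simp only [Nat.shiftRight_zero, Nat.cast_zero, add_zero]
      exact goB_fuel q fuel (q + 1) hf (by omega) _ _ _ _
    · have hq2 : q % 2 = 1 := Nat.odd_iff.mp ho
      have hqpos : 0 < q := by omega
      obtain ⟨g, rfl⟩ : ∃ g, fuel = g + 1 := ⟨fuel - 1, by omega⟩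
      have h1 : q >>> 1 = q / 2 := by rw [Nat.shiftRight_eq_div_pow]
      have hstep : compileAlgoGoB (g + 1) q iSrc iDst k acc =
          compileAlgoGoB g (q / 2) (iSrc + 1) iDst (k + 1) acc := by
        rw [compileAlgoGoB]
        simp [hqpos, Nat.and_one_is_mod, hq2, h1]
      rw [hstep, ih (q / 2) (by omega) g (by omega), pvOnes_odd q hq2,
        pv_shiftRight_succ_div]
      congr 1
      · push_cast; ring
      · omega

-- after consuming the one-run the next bit is 0 (or the mask is exhausted)
theorem pv_after_ones_even : ∀ q : Nat, (q >>> pvOnes q) % 2 = 0 := by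
  intro q
  induction q using Nat.strong_induction_on with
  | _ q ih =>
    rcases Nat.even_or_odd q with he | ho
    · have hq2 : q % 2 = 0 := Nat.even_iff.mp he
      rw [pvOnes_even q hq2]
      simpa using hq2
    · have hq2 : q % 2 = 1 := Nat.odd_iff.mp ho
      rw [pvOnes_odd q hq2, pv_shiftRight_succ_div]
      exact ih (q / 2) (by omega)

-- main loop equivalence
theorem goA_eq_goB : ∀ m fuel : Nat, m < fuel → ∀ (iSrc iDst : Int) (acc : List (Int × Int × Int)),
    compileAlgoGoA fuel m iSrc iDst acc = compileAlgoGoB (m + 1) m iSrc iDst 0 acc := by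
  intro m
  induction m using Nat.strong_induction_on with
  | _ m ih =>
    intro fuel hf iSrc iDst acc
    obtain ⟨g, rfl⟩ : ∃ g, fuel = g + 1 := ⟨fuel - 1, by omega⟩
    rcases Nat.eq_zero_or_pos m with rfl | hm
    · rw [goA_zero, goB_stop 1 (by omega)]; simp
    obtain ⟨s, hs⟩ : ∃ s, s = pvTz m := ⟨_, rfl⟩
    obtain ⟨q, hq⟩ : ∃ q, q = m >>> s := ⟨_, rfl⟩
    have hqodd : q % 2 = 1 := by rw [hq, hs]; exact pv_shift_tz_odd m hm
    obtain ⟨c, hc⟩ : ∃ c, c = pvOnes q := ⟨_, rfl⟩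
    have hcpos : 1 ≤ c := by rw [hc]; exact pvOnes_pos q hqodd
    obtain ⟨m2, hm2⟩ : ∃ m2, m2 = q >>> c := ⟨_, rfl⟩
    have hm2even : m2 % 2 = 0 := by rw [hm2, hc]; exact pv_after_ones_even q
    have hm2lt : m2 < m := by
      have hqle : q ≤ m := by rw [hq]; exact Nat.shiftRight_le m s
      have h1 : m2 < q := by rw [hm2]; exact pv_shift_lt q c (by omega) hcpos
      omega
    -- B side: skip zeros, consume ones
    have hB : compileAlgoGoB (m + 1) m iSrc iDst 0 acc =
        compileAlgoGoB (m2 + 1) m2 (iSrc + (s : Int) + (c : Int)) iDst c acc := by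
      rw [goB_skip m (m + 1) (by omega) iSrc iDst acc, ← hs, ← hq,
        goB_ones q (q + 1) (by omega) _ iDst 0 acc, ← hc, ← hm2]
      simp
    -- A side: one unfold
    have hA : compileAlgoGoA (g + 1) m iSrc iDst acc =
        compileAlgoGoA g m2 (iSrc + (s : Int) + (c : Int)) (iDst + (c : Int))
          (acc ++ [(iSrc + (s : Int), iDst, ((1 : Int) <<< c) - 1)]) := by
      have h0 := goA_unfold g m iSrc iDst acc hm
      rw [← hs, ← hq, ← hc, ← hm2] at h0
      exact h0
    rw [hA, hB]
    have hcne : c ≠ 0 := by omega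
    have harg : iSrc + (s : Int) + (c : Int) - (c : Int) = iSrc + (s : Int) := by ring
    rcases Nat.eq_zero_or_pos m2 with hz | hm2pos
    · -- mask exhausted: B flushes the open run, A has already appended it
      rw [hz, goA_zero, goB_stop 1 (by omega)]
      simp [hcne, harg]
    · -- next bit is 0: B flushes and continues with an empty run, A recurses
      have h1 : m2 >>> 1 = m2 / 2 := by rw [Nat.shiftRight_eq_div_pow]
      have hBf : compileAlgoGoB (m2 + 1) m2 (iSrc + (s : Int) + (c : Int)) iDst c acc =
          compileAlgoGoB m2 (m2 / 2) (iSrc + (s : Int) + (c : Int) + 1) (iDst + (c : Int)) 0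
            (acc ++ [(iSrc + (s : Int), iDst, ((1 : Int) <<< c) - 1)]) := by
        rw [compileAlgoGoB]
        simp [hm2pos, Nat.and_one_is_mod, hm2even, hcne, harg, h1]
      have hBc : compileAlgoGoB (m2 + 1) m2 (iSrc + (s : Int) + (c : Int)) (iDst + (c : Int)) 0
            (acc ++ [(iSrc + (s : Int), iDst, ((1 : Int) <<< c) - 1)]) =
          compileAlgoGoB m2 (m2 / 2) (iSrc + (s : Int) + (c : Int) + 1) (iDst + (c : Int)) 0
            (acc ++ [(iSrc + (s : Int), iDst, ((1 : Int) <<< c) - 1)]) := by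
        rw [compileAlgoGoB]
        simp [hm2pos, Nat.and_one_is_mod, hm2even, h1]
      rw [hBf, ih m2 hm2lt g (by omega), hBc]

-- ===== VERDICT (by name: the statement is the Claim_ definition above) =====
theorem compileAlgo_spec : Claim_equal_compileAlgo := by
  intro fMask _
  unfold Spec_compileAlgo compileAlgo compileAlgo_alt
  exact goA_eq_goB fMask.toNat (fMask.toNat + 1) (by omega) 0 0 []
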